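-- pv_equiv track=rewrite | github.com/DaNiCHKaTZ/labs | tech/l5/lab5(6).py | new_arr
-- ===== SOURCE A (Python) =====
-- def new_arr(arr):
--     result = []
--     left = 0
--     right = len(arr) - 1
--     while left <= right:
--         if left <= right:
--             result.append(arr[left])
--             left += 1
--         if left <= right:
--             result.append(arr[left])
--             left += 1
--         if left <= right:
--             result.append(arr[right])
--             right -= 1
--         if left <= right:
--             result.append(arr[right])
--             right -= 1
--     return result
-- ===== SOURCE B (Python) =====
-- def new_arr(arr):
--     out = []
--     cur = list(arr)
--     while cur:
--         out += cur[:2]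
--         rest = cur[2:]
--         out += reversed(rest[-2:])
--         cur = rest[:-2]
--     return out
-- ===== Notes on version B (the rewrite author's own statement) =====
-- stated objective: simpler
-- what changed: Replaced the two-pointer index while-loop with four sequential guarded appends by a loop that slices two elements off the front and two (reversed) off the back of a shrinking list each round.
import Mathlib
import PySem

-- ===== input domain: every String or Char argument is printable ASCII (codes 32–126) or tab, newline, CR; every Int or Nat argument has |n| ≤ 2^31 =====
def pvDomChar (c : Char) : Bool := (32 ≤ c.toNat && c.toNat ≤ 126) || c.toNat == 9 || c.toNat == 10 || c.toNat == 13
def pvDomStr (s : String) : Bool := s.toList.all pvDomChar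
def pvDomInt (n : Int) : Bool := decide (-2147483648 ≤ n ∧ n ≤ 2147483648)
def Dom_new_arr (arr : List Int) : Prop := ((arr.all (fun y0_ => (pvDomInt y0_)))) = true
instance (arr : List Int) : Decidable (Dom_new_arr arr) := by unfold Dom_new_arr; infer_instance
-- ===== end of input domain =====

-- B replaces A's two-pointer index loop (four guarded appends per round) by a loop
-- that slices two elements off the front and two off the back of a shrinking list
-- (objective: simpler).

-- ===== PORT A =====
-- arr[i]; every index the loop reads is in range (0 ≤ left ≤ right < len), so the default is never used
def pyAt (arr : List Int) (i : Int) : Int := (PySem.List.pyGet? arr i).getD 0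

-- the while-loop of A; its four sequential `if left <= right` tests nest faithfully,
-- since once a test fails (left only grows, right only shrinks) all later tests fail too
def new_arr_go (arr result : List Int) (left right : Int) : List Int :=
  if _h1 : left ≤ right then
    let r1 := result ++ [pyAt arr left]
    if _h2 : left + 1 ≤ right then
      let r2 := r1 ++ [pyAt arr (left + 1)]
      if _h3 : left + 2 ≤ right then
        let r3 := r2 ++ [pyAt arr right]
        if _h4 : left + 2 ≤ right - 1 then
          new_arr_go arr (r3 ++ [pyAt arr (right - 1)]) (left + 2) (right - 2)
        else
          new_arr_go arr r3 (left + 2) (right - 1)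
      else
        new_arr_go arr r2 (left + 2) right
    else
      new_arr_go arr r1 (left + 1) right
  else
    result
termination_by (right - left + 1).toNat
decreasing_by all_goals (simp_wf; omega)

def new_arr (arr : List Int) : List Int :=
  new_arr_go arr [] 0 ((arr.length : Int) - 1)

-- ===== PORT B =====
-- the loop body shrinks cur: its new value drops at least the two front elements
lemma middle_len (cur : List Int) (h : ¬ cur = []) :
    (PySem.List.slice (PySem.List.slice cur (some 2) none) none (some (-2))).length
      < cur.length := by
  have h1 : PySem.List.slice cur (some 2) none = cur.drop 2 := by
    rw [PySem.List.slice_from cur (by omega : (0:Int) ≤ 2)]; rfl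
  simp only [PySem.List.slice_to_neg_ofNat _ 2 (by omega), h1]
  cases cur with
  | nil => simp_all
  | cons a t => simp; omega

def new_arr_alt_go (out cur : List Int) : List Int :=
  if h : cur = [] then out
  else
    let out1 := out ++ PySem.List.slice cur none (some 2)
    let rest := PySem.List.slice cur (some 2) none
    let out2 := out1 ++ (PySem.List.slice rest (some (-2)) none).reverse
    let cur1 := PySem.List.slice rest none (some (-2))
    new_arr_alt_go out2 cur1
termination_by cur.length
decreasing_by exact middle_len cur h

def new_arr_alt (arr : List Int) : List Int :=
  new_arr_alt_go [] arr

-- ===== PRECONDITION & SPEC =====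
def Spec_new_arr (arr : List Int) (out : List Int) : Prop := out = new_arr_alt arr
instance (arr : List Int) (out : List Int) : Decidable (Spec_new_arr arr out) := by unfold Spec_new_arr; infer_instance

-- ===== CLAIM (what is proved, stated in full; the proofs are below) =====
def Claim_equal_new_arr : Prop := ∀ (arr : List Int), Dom_new_arr arr → Spec_new_arr arr (new_arr arr)

-- ===== LEMMAS AND PROOFS =====

-- proof-level recursive reading of B's loop
def altRec (arr : List Int) : List Int :=
  if arr = [] then []
  else
    let front2 := PySem.List.slice arr none (some 2)
    let remaining := PySem.List.slice arr (some 2) none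
    let back2 := (PySem.List.slice remaining (some (-2)) none).reverse
    let middle := PySem.List.slice remaining none (some (-2))
    front2 ++ back2 ++ altRec middle
termination_by arr.length
decreasing_by exact middle_len arr (by assumption)

lemma go_acc : ∀ (N : Nat) (cur out : List Int), cur.length ≤ N →
    new_arr_alt_go out cur = out ++ altRec cur := by
  intro N
  induction N with
  | zero =>
    intro cur out h
    have : cur = [] := by cases cur <;> simp_all
    subst this
    rw [new_arr_alt_go, altRec]
    simp
  | succ N ihN =>
    intro cur out h
    by_cases hc : cur = []
    · subst hc
      rw [new_arr_alt_go, altRec]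
      simp
    · rw [new_arr_alt_go, dif_neg hc]
      rw [ihN _ _ (by have := middle_len cur hc; omega)]
      conv_rhs => rw [altRec.eq_def]
      rw [if_neg hc]
      simp

lemma alt_eq (arr : List Int) : new_arr_alt arr = altRec arr := by
  unfold new_arr_alt
  rw [go_acc arr.length arr [] le_rfl]
  simp


lemma alt_nil : altRec [] = [] := by
  unfold altRec; simp

lemma alt_one (x : Int) : altRec [x] = [x] := by
  unfold altRec
  simp [pysem, alt_nil]

lemma alt_two (x y : Int) : altRec [x, y] = [x, y] := by
  unfold altRec
  simp [pysem, alt_nil]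

lemma alt_three (x y z : Int) : altRec [x, y, z] = [x, y, z] := by
  unfold altRec
  simp [pysem, alt_nil]

lemma alt_big (x y z w : Int) (m : List Int) :
    altRec (x :: y :: (m ++ [z, w])) = x :: y :: w :: z :: altRec m := by
  have h1 : PySem.List.slice (x :: y :: (m ++ [z, w])) none (some 2) = [x, y] := by
    rw [PySem.List.slice_to _ (by omega : (0:Int) ≤ 2)]; rfl
  have h2 : PySem.List.slice (x :: y :: (m ++ [z, w])) (some 2) none = m ++ [z, w] := by
    rw [PySem.List.slice_from _ (by omega : (0:Int) ≤ 2)]; rfl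
  have h3 : PySem.List.slice (m ++ [z, w]) (some (-2)) none = [z, w] := by
    rw [PySem.List.slice_from_neg_ofNat _ 2 (by omega)]
    have : (m ++ [z, w]).length - 2 = m.length := by simp
    rw [this, List.drop_left]
  have h4 : PySem.List.slice (m ++ [z, w]) none (some (-2)) = m := by
    rw [PySem.List.slice_to_neg_ofNat _ 2 (by omega)]
    have : (m ++ [z, w]).length - 2 = m.length := by simp
    rw [this, List.take_left]
  conv_lhs => rw [altRec.eq_def]
  simp only [h1, h2, h3, h4, if_neg (show ¬(x :: y :: (m ++ [z, w])) = [] by simp)]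
  simp

lemma pyAt_nat (xs : List Int) (j : Nat) (h : j < xs.length) :
    pyAt xs (j : Int) = xs[j] := by
  unfold pyAt
  simp [PySem.List.pyGet?_natCast, List.getElem?_eq_getElem h]

lemma seg1 (xs : List Int) (l : Nat) (h : l < xs.length) :
    (xs.drop l).take 1 = [pyAt xs (l : Int)] := by
  rw [List.drop_eq_getElem_cons h, pyAt_nat xs l h]
  rfl

lemma seg2 (xs : List Int) (l : Nat) (h : l + 2 ≤ xs.length) :
    (xs.drop l).take 2 = [pyAt xs (l : Int), pyAt xs ((l + 1 : Nat) : Int)] := by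
  rw [List.drop_eq_getElem_cons (by omega : l < xs.length),
      List.drop_eq_getElem_cons (by omega : l + 1 < xs.length),
      pyAt_nat xs l (by omega), pyAt_nat xs (l + 1) (by omega)]
  rfl

lemma seg3 (xs : List Int) (l : Nat) (h : l + 3 ≤ xs.length) :
    (xs.drop l).take 3 =
      [pyAt xs (l : Int), pyAt xs ((l + 1 : Nat) : Int), pyAt xs ((l + 2 : Nat) : Int)] := by
  rw [List.drop_eq_getElem_cons (by omega : l < xs.length),
      List.drop_eq_getElem_cons (by omega : l + 1 < xs.length),
      List.drop_eq_getElem_cons (by omega : l + 2 < xs.length),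
      pyAt_nat xs l (by omega), pyAt_nat xs (l + 1) (by omega), pyAt_nat xs (l + 2) (by omega)]
  rfl

lemma seg_decomp (xs : List Int) (l n : Nat) (hn : 4 ≤ n) (hlen : l + n ≤ xs.length) :
    (xs.drop l).take n =
      pyAt xs (l : Int) :: pyAt xs ((l + 1 : Nat) : Int) ::
        (((xs.drop (l + 2)).take (n - 4)) ++
          [pyAt xs ((l + n - 2 : Nat) : Int), pyAt xs ((l + n - 1 : Nat) : Int)]) := by
  obtain ⟨k, rfl⟩ : ∃ k, n = k + 4 := ⟨n - 4, by omega⟩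
  have h1 : (xs.drop l).take (k + 4) =
      (xs.drop l).take 2 ++ ((xs.drop (l + 2)).take k ++ (xs.drop (l + 2 + k)).take 2) := by
    rw [show k + 4 = 2 + (k + 2) from by omega, List.take_add, List.take_add]
    simp [List.drop_drop]
  have hs1 : (xs.drop l).take 2 = [pyAt xs (l : Int), pyAt xs ((l + 1 : Nat) : Int)] :=
    seg2 xs l (by omega)
  have hs2 : (xs.drop (l + 2 + k)).take 2 =
      [pyAt xs ((l + 2 + k : Nat) : Int), pyAt xs ((l + 2 + k + 1 : Nat) : Int)] :=
    seg2 xs (l + 2 + k) (by omega)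
  rw [h1, hs1, hs2,
      show l + 2 + k = l + (k + 4) - 2 from by omega,
      show l + (k + 4) - 2 + 1 = l + (k + 4) - 1 from by omega,
      show k + 4 - 4 = k from by omega]
  simp

lemma go_spec (arr : List Int) :
    ∀ (n : Nat) (left right : Int) (result : List Int),
      (right - left + 1).toNat = n → 0 ≤ left → right < (arr.length : Int) →
      new_arr_go arr result left right =
        result ++ altRec ((arr.drop left.toNat).take n) := by
  intro n
  induction n using Nat.strong_induction_on with
  | _ n ih =>
  intro left right result hn h0 hlt
  have e0 : ((left.toNat : Nat) : Int) = left := by omega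
  rw [new_arr_go]
  by_cases hc1 : left ≤ right
  · rw [dif_pos hc1]
    have hlen : left.toNat + n ≤ arr.length := by omega
    by_cases hc2 : left + 1 ≤ right
    · rw [dif_pos hc2]
      by_cases hc3 : left + 2 ≤ right
      · rw [dif_pos hc3]
        by_cases hc4 : left + 2 ≤ right - 1
        · -- n ≥ 4
          rw [dif_pos hc4]
          rw [ih (n - 4) (by omega) (left + 2) (right - 2) _
                (by omega) (by omega) (by omega)]
          rw [seg_decomp arr left.toNat n (by omega) hlen, alt_big]
          have e1 : ((left.toNat + 1 : Nat) : Int) = left + 1 := by omega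
          have e2 : ((left.toNat + n - 2 : Nat) : Int) = right - 1 := by omega
          have e3 : ((left.toNat + n - 1 : Nat) : Int) = right := by omega
          have e4 : (left + 2).toNat = left.toNat + 2 := by omega
          rw [e0, e1, e2, e3, e4]
          simp
        · -- n = 3
          rw [dif_neg hc4]
          rw [ih 0 (by omega) (left + 2) (right - 1) _ (by omega) (by omega) (by omega)]
          have hn3 : n = 3 := by omega
          rw [hn3, seg3 arr left.toNat (by omega)]
          have e1 : ((left.toNat + 1 : Nat) : Int) = left + 1 := by omega
          have e2 : ((left.toNat + 2 : Nat) : Int) = right := by omega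
          rw [e0, e1, e2, alt_three]
          simp [alt_nil]
      · -- n = 2
        rw [dif_neg hc3]
        rw [ih 0 (by omega) (left + 2) right _ (by omega) (by omega) (by omega)]
        have hn2 : n = 2 := by omega
        rw [hn2, seg2 arr left.toNat (by omega)]
        have e1 : ((left.toNat + 1 : Nat) : Int) = left + 1 := by omega
        rw [e0, e1, alt_two]
        simp [alt_nil]
    · -- n = 1
      rw [dif_neg hc2]
      rw [ih 0 (by omega) (left + 1) right _ (by omega) (by omega) (by omega)]
      have hn1 : n = 1 := by omega
      rw [hn1, seg1 arr left.toNat (by omega)]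
      rw [e0, alt_one]
      simp [alt_nil]
  · -- loop exit: n = 0
    rw [dif_neg hc1]
    have hn0 : n = 0 := by omega
    rw [hn0]
    simp [alt_nil]

-- ===== VERDICT (by name: the statement is the Claim_ definition above) =====
theorem new_arr_spec : Claim_equal_new_arr := by
  intro arr _
  unfold Spec_new_arr new_arr
  rw [alt_eq]
  have h := go_spec arr arr.length 0 ((arr.length : Int) - 1) [] (by omega) le_rfl (by omega)
  simpa using h
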